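-- pv_equiv track=rewrite | github.com/bmmeijers/tgap-ng | tgap_ng/edge_simplify/SYSimplified.py | returnIndexesOfSearchedElems
-- ===== SOURCE A (Python) =====
-- def returnIndexesOfSearchedElems(listToBeSearched: list, queryKeywords: list) -> dict:
--     # Returns the indexes which contain one of the keywords in the queries list
--     # in the form a dictionary key=enum -> value=list[idx]
--     resultDict = {}
--     for qK in queryKeywords:
--         resultDict[qK] = []
--
--     for i in range(0, len(listToBeSearched)):
--         elem = listToBeSearched[i]
--         if elem in queryKeywords:
--             # add the index associated to that element
--             resultDict[elem].append(i)
--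
--     return resultDict
-- ===== SOURCE B (Python) =====
-- def returnIndexesOfSearchedElems(listToBeSearched: list, queryKeywords: list) -> dict:
--     # One-pass hash grouping: index every element's positions once, then look
--     # each keyword up, so the per-element membership scan over queryKeywords disappears.
--     positions = {}
--     for i, e in enumerate(listToBeSearched):
--         positions.setdefault(e, []).append(i)
--     return {qK: positions.get(qK, []) for qK in queryKeywords}
-- ===== Notes on version B (the rewrite author's own statement) =====
-- stated objective: faster
-- what changed: Replaces A's per-element linear membership scan of queryKeywords (plus an empty-bucket init pass) by one hash-grouping pass that indexes every element's positions, then a dict comprehension looking each keyword up.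
import Mathlib
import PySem

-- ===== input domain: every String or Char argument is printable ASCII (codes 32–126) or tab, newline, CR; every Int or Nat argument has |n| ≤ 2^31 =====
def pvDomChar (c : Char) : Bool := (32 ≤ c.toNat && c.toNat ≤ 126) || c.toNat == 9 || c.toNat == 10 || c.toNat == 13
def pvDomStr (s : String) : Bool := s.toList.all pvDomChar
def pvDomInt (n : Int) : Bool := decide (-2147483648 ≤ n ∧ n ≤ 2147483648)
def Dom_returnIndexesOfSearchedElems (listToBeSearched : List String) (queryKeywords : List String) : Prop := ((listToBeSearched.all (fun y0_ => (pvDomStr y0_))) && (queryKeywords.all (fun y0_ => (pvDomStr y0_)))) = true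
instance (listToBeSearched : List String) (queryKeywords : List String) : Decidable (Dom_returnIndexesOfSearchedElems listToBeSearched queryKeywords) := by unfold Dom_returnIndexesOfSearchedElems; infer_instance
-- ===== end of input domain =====

-- B replaces A's per-element membership scan of queryKeywords by one hash-grouping pass over the
-- list followed by a per-keyword lookup; objective: faster (removes the inner linear scan).

-- ===== PORT A =====
-- resultDict = {}; for qK in queryKeywords: resultDict[qK] = []
-- for i in range(0, len(listToBeSearched)): elem = listToBeSearched[i];
--   if elem in queryKeywords: resultDict[elem].append(i)
-- (the append is Dict.modify; its default [] is never used since elem ∈ queryKeywords is already a key)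
def returnIndexesOfSearchedElems (listToBeSearched : List String) (queryKeywords : List String) : List (String × List Int) :=
  let d0 : PySem.Dict String (List Int) :=
    queryKeywords.foldl (fun d qK => d.insert qK ([] : List Int)) PySem.Dict.empty
  let d1 :=
    (PySem.List.pyRange 0 (listToBeSearched.length : Int) 1).foldl
      (fun d i =>
        let elem := PySem.List.pyGetD listToBeSearched i ""
        if elem ∈ queryKeywords then d.modify elem [] (· ++ [i]) else d) d0
  d1.items

-- ===== PORT B =====
-- positions = {}; for i, e in enumerate(listToBeSearched): positions.setdefault(e, []).append(i)
-- return {qK: positions.get(qK, []) for qK in queryKeywords}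
def returnIndexesOfSearchedElems_alt (listToBeSearched : List String) (queryKeywords : List String) : List (String × List Int) :=
  let positions : PySem.Dict String (List Int) :=
    (PySem.List.enumerate listToBeSearched 0).foldl
      (fun d p => d.modify p.2 [] (· ++ [p.1])) PySem.Dict.empty
  (queryKeywords.foldl
    (fun d qK => d.insert qK (positions.getD qK [])) PySem.Dict.empty).items

-- ===== PRECONDITION & SPEC =====
def Spec_returnIndexesOfSearchedElems (listToBeSearched : List String) (queryKeywords : List String) (out : List (String × List Int)) : Prop := out = returnIndexesOfSearchedElems_alt listToBeSearched queryKeywords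
instance (listToBeSearched : List String) (queryKeywords : List String) (out : List (String × List Int)) : Decidable (Spec_returnIndexesOfSearchedElems listToBeSearched queryKeywords out) := by unfold Spec_returnIndexesOfSearchedElems; infer_instance

-- ===== CLAIM (what is proved, stated in full; the proofs are below) =====
def Claim_equal_returnIndexesOfSearchedElems : Prop := ∀ (listToBeSearched : List String) (queryKeywords : List String), Dom_returnIndexesOfSearchedElems listToBeSearched queryKeywords → Spec_returnIndexesOfSearchedElems listToBeSearched queryKeywords (returnIndexesOfSearchedElems listToBeSearched queryKeywords)

-- ===== LEMMAS AND PROOFS =====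

-- B's fold: looking up k after inserting a (key-determined) value for every keyword
lemma getD_foldl_insert_valfun (q : List String) (v : String → List Int) (k : String) :
    ∀ d : PySem.Dict String (List Int),
      (q.foldl (fun d x => d.insert x (v x)) d).getD k [] =
        if k ∈ q then v k else d.getD k [] := by
  induction q with
  | nil => intro d; simp
  | cons x rest ih =>
      intro d
      simp only [List.foldl_cons, ih, PySem.Dict.getD_insert, List.mem_cons]
      by_cases hr : k ∈ rest <;> by_cases hx : k = x <;> simp [hr, hx]

-- A's init fold: every stored value is []
lemma getD_foldl_insert_nil (q : List String) (k : String) :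
    ∀ d : PySem.Dict String (List Int), d.getD k [] = [] →
      (q.foldl (fun d x => d.insert x ([] : List Int)) d).getD k [] = [] := by
  induction q with
  | nil => intro d h; simpa using h
  | cons x rest ih =>
      intro d h
      refine ih _ ?_
      rw [PySem.Dict.getD_insert]
      split <;> simp [h]

-- A's second loop keeps the key list unchanged when every keyword is already a key
lemma keys_loopA (l q : List String) (idxs : List Int) :
    ∀ d : PySem.Dict String (List Int), (∀ x ∈ q, d.contains x = true) →
      (idxs.foldl
        (fun d i =>
          let elem := PySem.List.pyGetD l i ""
          if elem ∈ q then d.modify elem [] (· ++ [i]) else d) d).keys = d.keys := by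
  induction idxs with
  | nil => intro d _; rfl
  | cons i rest ih =>
      intro d hd
      simp only [List.foldl_cons]
      by_cases he : PySem.List.pyGetD l i "" ∈ q
      · have hc := hd _ he
        have hkeys : (d.modify (PySem.List.pyGetD l i "") [] (· ++ [i])).keys = d.keys := by
          rw [PySem.Dict.keys_modify, PySem.Dict.keys_insert_of_contains _ _ hc]
        rw [if_pos he, ih _ ?_, hkeys]
        intro x hx
        rw [PySem.Dict.contains_iff_mem_keys, hkeys, ← PySem.Dict.contains_iff_mem_keys]
        exact hd _ hx
      · rw [if_neg he, ih _ hd]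

-- A's second loop appends, per key k ∈ q, exactly the matching indices
lemma getD_loopA (l q : List String) (k : String) (hk : k ∈ q) (idxs : List Int) :
    ∀ d : PySem.Dict String (List Int),
      (idxs.foldl
        (fun d i =>
          let elem := PySem.List.pyGetD l i ""
          if elem ∈ q then d.modify elem [] (· ++ [i]) else d) d).getD k [] =
      d.getD k [] ++ idxs.filter (fun i => PySem.List.pyGetD l i "" == k) := by
  induction idxs with
  | nil => intro d; simp
  | cons i rest ih =>
      intro d
      simp only [List.foldl_cons, List.filter_cons]
      by_cases he : PySem.List.pyGetD l i "" ∈ q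
      · rw [if_pos he, ih, PySem.Dict.getD_modify]
        by_cases hek : PySem.List.pyGetD l i "" = k
        · simp [hek]
        · simp [hek, Ne.symm hek]
      · have hek : (PySem.List.pyGetD l i "" == k) = false := by
          simp only [beq_eq_false_iff_ne]; rintro rfl; exact he hk
        rw [if_neg he, ih, hek]
        simp
  
-- enumerate as a map over List.range (values read with getD)
lemma enumerate_eq_map_range (l : List String) :
    ∀ m : Nat, PySem.List.enumerate l (m : Int) =
      (List.range l.length).map (fun n => (((m + n : Nat) : Int), l.getD n "")) := by
  induction l with
  | nil => intro m; simp [PySem.List.enumerate]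
  | cons x xs ih =>
      intro m
      rw [PySem.List.enumerate_cons]
      have : ((m : Int) + 1) = ((m + 1 : Nat) : Int) := by push_cast; ring
      rw [this, ih (m + 1)]
      simp only [List.length_cons, List.range_succ_eq_map, List.map_cons, List.map_map]
      congr 1
      all_goals simp
      all_goals (intro a _; omega)

-- the per-keyword value: A's filtered range = B's filtered enumerate
lemma value_eq (l : List String) (k : String) :
    ((PySem.List.pyRange 0 (l.length : Int) 1).filter (fun i => PySem.List.pyGetD l i "" == k)) =
      ((PySem.List.enumerate l 0).filter (fun p => p.2 == k)).map (·.1) := by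
  have h0 : (0 : Int) = ((0 : Nat) : Int) := rfl
  rw [PySem.List.pyRange_zero_nat, h0, enumerate_eq_map_range l 0]
  rw [List.filter_map, List.filter_map, List.map_map]
  simp [Function.comp_def, PySem.List.pyGetD_natCast]

-- ===== VERDICT (by name: the statement is the Claim_ definition above) =====
theorem returnIndexesOfSearchedElems_spec : Claim_equal_returnIndexesOfSearchedElems := by
  intro l q _
  unfold Spec_returnIndexesOfSearchedElems returnIndexesOfSearchedElems returnIndexesOfSearchedElems_alt
  simp only []
  set pos : PySem.Dict String (List Int) :=
    (PySem.List.enumerate l 0).foldl (fun d p => d.modify p.2 [] (· ++ [p.1])) PySem.Dict.empty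
    with hpos
  set v : String → List Int := fun qK => pos.getD qK [] with hv
  set d0 : PySem.Dict String (List Int) :=
    q.foldl (fun d qK => d.insert qK ([] : List Int)) PySem.Dict.empty with hd0
  set dB : PySem.Dict String (List Int) :=
    q.foldl (fun d x => d.insert x (v x)) PySem.Dict.empty with hdB
  set dA := (PySem.List.pyRange 0 (l.length : Int) 1).foldl
      (fun d i =>
        let elem := PySem.List.pyGetD l i ""
        if elem ∈ q then d.modify elem [] (· ++ [i]) else d) d0 with hdA
  -- keys
  have hk0 : d0.keys = PySem.Set.ofList q := by
    rw [hd0, PySem.Dict.keys_foldl_insert q (fun _ _ => ([] : List Int)),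
        PySem.Dict.keys_empty, PySem.Set.update_nil_left]
  have hkB : dB.keys = PySem.Set.ofList q := by
    rw [hdB, PySem.Dict.keys_foldl_insert q (fun _ x => v x),
        PySem.Dict.keys_empty, PySem.Set.update_nil_left]
  have hkA : dA.keys = PySem.Set.ofList q := by
    rw [hdA, keys_loopA l q _ d0 ?_, hk0]
    intro x hx
    rw [PySem.Dict.contains_iff_mem_keys, hk0, PySem.Set.mem_ofList]
    exact hx
  have hnd0 : d0.keys.Nodup := by
    rw [hd0]; exact PySem.Dict.nodup_keys_foldl_insert q _ _ (by simp)
  have hndA : dA.keys.Nodup := by rw [hkA, ← hk0]; exact hnd0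
  have hndB : dB.keys.Nodup := by
    rw [hdB]; exact PySem.Dict.nodup_keys_foldl_insert q _ _ (by simp)
  rw [PySem.Dict.items_eq_map_keys dA hndA ([] : List Int),
      PySem.Dict.items_eq_map_keys dB hndB ([] : List Int), hkA, hkB]
  apply List.map_congr_left
  intro k hkmem
  have hkq : k ∈ q := (PySem.Set.mem_ofList q k).mp hkmem
  have hA : dA.getD k [] =
      (PySem.List.pyRange 0 (l.length : Int) 1).filter (fun i => PySem.List.pyGetD l i "" == k) := by
    rw [hdA, getD_loopA l q k hkq, getD_foldl_insert_nil q k PySem.Dict.empty (by simp)]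
    simp
  have hB : dB.getD k [] = v k := by
    rw [hdB, getD_foldl_insert_valfun q v k, if_pos hkq]
  have hpk : pos.getD k [] =
      ((PySem.List.enumerate l 0).filter (fun p => p.2 == k)).map (·.1) := by
    have hswap : pos = ((PySem.List.enumerate l 0).map Prod.swap).foldl
        (fun d p => d.modify p.1 [] (· ++ [p.2])) PySem.Dict.empty := by
      rw [hpos, List.foldl_map]; rfl
    rw [hswap, PySem.Dict.getD_foldl_modify_append, PySem.Dict.getD_empty,
        List.filter_map, List.map_map]
    simp [Function.comp_def]
  rw [hA, hB]
  simp only [hv]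
  rw [hpk, value_eq]
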